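-- pv_equiv track=rewrite | github.com/laraliesenberg/pratica-python-ifc | Lista7/LL-Alg-07-Ex-06.py | anagramas_frase
-- ===== SOURCE A (Python) =====
-- def anagramas_frase(frase1, frase2):
--     frase1 = frase1.upper()
--     frase2 = frase2.upper()
--     frase1 = frase1.replace(" ", "")
--     frase2 = frase2.replace(" ", "")
--     dicionario1 = {}
--     dicionario2 = {}
--     for caractere in frase1:
--         if caractere in dicionario1:
--             dicionario1[caractere] += 1
--         else:
--             dicionario1[caractere] = 1
--     for caractere in frase2:
--         if caractere in dicionario2:
--             dicionario2[caractere] += 1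
--         else:
--             dicionario2[caractere] = 1
--     if dicionario1 == dicionario2:
--         return True
--     else:
--         return False
-- ===== SOURCE B (Python) =====
-- def anagramas_frase(frase1, frase2):
--     frase1 = frase1.upper().replace(" ", "")
--     frase2 = frase2.upper().replace(" ", "")
--     return sorted(frase1) == sorted(frase2)
-- ===== Notes on version B (the rewrite author's own statement) =====
-- stated objective: idiomatic
-- what changed: Replaces the two explicit character-frequency dictionaries and their unordered comparison by sort-and-compare: sorted(frase1) == sorted(frase2) after the identical normalization (upper, spaces removed).
import Mathlib
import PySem

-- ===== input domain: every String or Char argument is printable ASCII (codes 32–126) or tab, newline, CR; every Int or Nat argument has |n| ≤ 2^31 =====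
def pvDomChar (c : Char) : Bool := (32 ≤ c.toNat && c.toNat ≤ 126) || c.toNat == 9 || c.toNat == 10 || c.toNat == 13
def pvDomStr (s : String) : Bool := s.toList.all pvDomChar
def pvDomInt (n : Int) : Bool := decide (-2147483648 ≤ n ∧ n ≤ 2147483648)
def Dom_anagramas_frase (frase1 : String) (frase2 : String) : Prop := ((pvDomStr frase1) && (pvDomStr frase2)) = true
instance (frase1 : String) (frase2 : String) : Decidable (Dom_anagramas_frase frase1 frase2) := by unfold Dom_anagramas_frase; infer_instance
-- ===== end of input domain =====

-- B replaces A's two hand-built frequency dictionaries and unordered dict comparison by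
-- sort-and-compare on the identically normalized strings (idiomatic; same return value).

-- ===== PORT A =====
-- Python's `dict1 == dict2` ignores insertion order: same size and every key/value of d1 found in d2.
def pyDictEq (d1 d2 : PySem.Dict Char Int) : Bool :=
  PySem.Dict.size d1 == PySem.Dict.size d2 &&
    d1.items.all (fun kv => PySem.Dict.get? d2 kv.1 == some kv.2)

def anagramas_frase (frase1 : String) (frase2 : String) : Bool :=
  let frase1 := PySem.Str.upper frase1
  let frase2 := PySem.Str.upper frase2
  let frase1 := PySem.Str.replace frase1 " " ""
  let frase2 := PySem.Str.replace frase2 " " ""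
  let dicionario1 : PySem.Dict Char Int :=
    frase1.toList.foldl
      (fun d c => if d.contains c then d.insert c (d.getD c 0 + 1) else d.insert c 1)
      PySem.Dict.empty
  let dicionario2 : PySem.Dict Char Int :=
    frase2.toList.foldl
      (fun d c => if d.contains c then d.insert c (d.getD c 0 + 1) else d.insert c 1)
      PySem.Dict.empty
  if pyDictEq dicionario1 dicionario2 then true else false

-- ===== PORT B =====
def anagramas_frase_alt (frase1 : String) (frase2 : String) : Bool :=
  let f1 := PySem.Str.replace (PySem.Str.upper frase1) " " ""
  let f2 := PySem.Str.replace (PySem.Str.upper frase2) " " ""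
  PySem.List.sorted f1.toList (fun x => x) false == PySem.List.sorted f2.toList (fun x => x) false

-- ===== PRECONDITION & SPEC =====
def Spec_anagramas_frase (frase1 : String) (frase2 : String) (out : Bool) : Prop := out = anagramas_frase_alt frase1 frase2
instance (frase1 : String) (frase2 : String) (out : Bool) : Decidable (Spec_anagramas_frase frase1 frase2 out) := by unfold Spec_anagramas_frase; infer_instance

-- ===== CLAIM (what is proved, stated in full; the proofs are below) =====
def Claim_equal_anagramas_frase : Prop := ∀ (frase1 : String) (frase2 : String), Dom_anagramas_frase frase1 frase2 → Spec_anagramas_frase frase1 frase2 (anagramas_frase frase1 frase2)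

-- ===== LEMMAS AND PROOFS =====

-- A's counting loop builds Counter(l).
theorem foldl_count_eq_counter (l : List Char) :
    l.foldl (fun d c => if d.contains c then d.insert c (d.getD c 0 + 1) else d.insert c 1)
      PySem.Dict.empty = PySem.Dict.counter l := by
  rw [← PySem.Dict.foldl_insert_getD_add_one_eq_counter]
  congr 1
  funext d c
  by_cases h : d.contains c = true
  · simp [h]
  · simp [h, PySem.Dict.getD_of_not_contains d 0 (by simpa using h)]

-- Python-dict equality of the two counters is exactly permutation of the character lists.
theorem pyDictEq_counter_iff_perm (l1 l2 : List Char) :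
    pyDictEq (PySem.Dict.counter l1) (PySem.Dict.counter l2) = true ↔ l1.Perm l2 := by
  constructor
  · intro h
    simp only [pyDictEq, Bool.and_eq_true, beq_iff_eq, List.all_eq_true] at h
    obtain ⟨hsize, hall⟩ := h
    have hsub : PySem.Set.ofList l1 ⊆ PySem.Set.ofList l2 := by
      intro k hk
      have hmem : (k, (List.count k l1 : Int)) ∈ (PySem.Dict.counter l1).items := by
        rw [PySem.Dict.items_counter]; exact List.mem_map_of_mem hk
      have hg := hall _ hmem
      have : PySem.Dict.get? (PySem.Dict.counter l2) k ≠ none := by simp [hg]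
      have hk2 : k ∈ (PySem.Dict.counter l2).keys := by
        by_contra hc
        exact this ((PySem.Dict.get?_eq_none_iff_not_mem_keys _ _).mpr hc)
      rwa [PySem.Dict.keys_counter] at hk2
    have hperm : (PySem.Set.ofList l1).Perm (PySem.Set.ofList l2) := by
      refine (List.subperm_of_subset (PySem.Set.nodup_ofList l1) hsub).perm_of_length_le ?_
      have h1 : PySem.Dict.size (PySem.Dict.counter l1) = (PySem.Set.ofList l1).length := by
        simp [PySem.Dict.size, PySem.Dict.items_counter]
      have h2 : PySem.Dict.size (PySem.Dict.counter l2) = (PySem.Set.ofList l2).length := by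
        simp [PySem.Dict.size, PySem.Dict.items_counter]
      omega
    rw [List.perm_iff_count]
    intro c
    by_cases hc : c ∈ l1
    · have hmem : (c, (List.count c l1 : Int)) ∈ (PySem.Dict.counter l1).items := by
        rw [PySem.Dict.items_counter]
        exact List.mem_map_of_mem ((PySem.Set.mem_ofList l1 c).mpr hc)
      have hg := hall _ hmem
      have hin := (PySem.Dict.get?_eq_some_iff_mem_items _ _ _ (PySem.Dict.nodup_keys_counter l2)).mp hg
      rw [PySem.Dict.items_counter] at hin
      obtain ⟨k, hk, heq⟩ := List.mem_map.mp hin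
      obtain ⟨hkc, hval⟩ := Prod.mk.injEq .. ▸ heq
      subst hkc
      have : (List.count k l2 : Int) = (List.count k l1 : Int) := by simpa using hval
      exact_mod_cast this.symm
    · have hc2 : c ∉ l2 := by
        intro h2
        exact hc ((PySem.Set.mem_ofList l1 c).mp
          (hperm.mem_iff.mpr ((PySem.Set.mem_ofList l2 c).mpr h2)))
      rw [List.count_eq_zero_of_not_mem hc, List.count_eq_zero_of_not_mem hc2]
  · intro hp
    have hcnt : ∀ c : Char, List.count c l1 = List.count c l2 := by
      intro c; exact (List.perm_iff_count.mp hp) c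
    have hofs : (PySem.Set.ofList l1).Perm (PySem.Set.ofList l2) := by
      refine (List.perm_ext_iff_of_nodup (PySem.Set.nodup_ofList l1) (PySem.Set.nodup_ofList l2)).mpr ?_
      intro a; rw [PySem.Set.mem_ofList, PySem.Set.mem_ofList]; exact hp.mem_iff
    simp only [pyDictEq, Bool.and_eq_true, beq_iff_eq, List.all_eq_true]
    constructor
    · simp [PySem.Dict.size, PySem.Dict.items_counter, hofs.length_eq]
    · intro kv hkv
      rw [PySem.Dict.items_counter] at hkv
      obtain ⟨k, hk, rfl⟩ := List.mem_map.mp hkv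
      have hk2 : k ∈ PySem.Set.ofList l2 := by
        rw [PySem.Set.mem_ofList] at hk ⊢; exact hp.mem_iff.mp hk
      have : (k, (List.count k l2 : Int)) ∈ (PySem.Dict.counter l2).items := by
        rw [PySem.Dict.items_counter]; exact List.mem_map_of_mem hk2
      have := PySem.Dict.get?_of_mem_items _ this (PySem.Dict.nodup_keys_counter l2)
      simp [this, hcnt k]

-- ===== VERDICT (by name: the statement is the Claim_ definition above) =====
theorem anagramas_frase_spec : Claim_equal_anagramas_frase := by
  intro frase1 frase2 _
  show anagramas_frase frase1 frase2 = anagramas_frase_alt frase1 frase2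
  simp only [anagramas_frase, anagramas_frase_alt]
  rw [foldl_count_eq_counter, foldl_count_eq_counter]
  have h : pyDictEq (PySem.Dict.counter (PySem.Str.replace (PySem.Str.upper frase1) " " "").toList)
      (PySem.Dict.counter (PySem.Str.replace (PySem.Str.upper frase2) " " "").toList)
      = ((PySem.List.sorted (PySem.Str.replace (PySem.Str.upper frase1) " " "").toList (fun x => x) false)
        == (PySem.List.sorted (PySem.Str.replace (PySem.Str.upper frase2) " " "").toList (fun x => x) false)) := by
    rw [Bool.eq_iff_iff, beq_iff_eq, PySem.List.sorted_id_eq_sorted_id_iff_perm]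
    exact pyDictEq_counter_iff_perm _ _
  rw [h]
  cases ((PySem.List.sorted (PySem.Str.replace (PySem.Str.upper frase1) " " "").toList (fun x => x) false)
        == (PySem.List.sorted (PySem.Str.replace (PySem.Str.upper frase2) " " "").toList (fun x => x) false)) <;> simp
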